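-- pv_equiv track=rewrite | github.com/davidclaphan/HackerRank | metaFinalRound/matchingArrayElements.py | matching_elements
-- ===== SOURCE A (Python) =====
-- def matching_elements(array1: list, array2: list):
--     values_1 = {}
--     values_2 = {}
--     counter = 0
--
--     for val in array1:
--         if val in values_1:
--             values_1[val] += 1
--         else:
--             values_1[val] = 1
--
--     for val in array2:
--         if val in values_2:
--             values_2[val] += 1
--         else:
--             values_2[val] = 1
--
--     for val in array1:
--         if val in values_1 and val in values_2:
--             counter += 1
--
--     return counter
-- ===== SOURCE B (Python) =====
-- def matching_elements(array1: list, array2: list):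
--     s1 = sorted(array1)
--     s2 = sorted(set(array2))
--     counter = 0
--     i = 0
--     j = 0
--     while i < len(s1) and j < len(s2):
--         if s1[i] < s2[j]:
--             i += 1
--         elif s1[i] > s2[j]:
--             j += 1
--         else:
--             counter += 1
--             i += 1
--     return counter
-- ===== Notes on version B (the rewrite author's own statement) =====
-- stated objective: alternative
-- what changed: A builds hash count-dicts for both arrays and rescans array1 testing each element against them; B abandons hashing entirely: it sorts array1 and the deduplicated array2 and counts the matches with a single two-pointer merge scan over the two sorted lists.
import Mathlib
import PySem

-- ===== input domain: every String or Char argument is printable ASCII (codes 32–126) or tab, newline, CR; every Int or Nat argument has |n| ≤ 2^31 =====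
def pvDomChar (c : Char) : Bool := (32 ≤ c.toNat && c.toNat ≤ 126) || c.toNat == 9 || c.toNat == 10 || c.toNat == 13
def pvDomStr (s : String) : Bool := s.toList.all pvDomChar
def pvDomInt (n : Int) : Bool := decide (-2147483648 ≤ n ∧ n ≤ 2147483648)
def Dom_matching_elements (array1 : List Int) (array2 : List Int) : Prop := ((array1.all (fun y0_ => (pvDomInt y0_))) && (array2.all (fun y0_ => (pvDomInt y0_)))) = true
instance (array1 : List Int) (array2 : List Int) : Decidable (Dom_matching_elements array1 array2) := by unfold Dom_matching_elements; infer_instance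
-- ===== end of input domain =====

-- B replaces A's hash count-dicts and rescan of array1 by a sort-based method:
-- sort array1 and the deduplicated array2, then count matches with a single
-- two-pointer merge scan (objective: alternative; not faster).

-- ===== PORT A =====
def matching_elements (array1 : List Int) (array2 : List Int) : Int :=
  let values_1 := array1.foldl
    (fun d val => if d.contains val then d.insert val (d.getD val 0 + 1) else d.insert val 1)
    (PySem.Dict.empty : PySem.Dict Int Int)
  let values_2 := array2.foldl
    (fun d val => if d.contains val then d.insert val (d.getD val 0 + 1) else d.insert val 1)
    (PySem.Dict.empty : PySem.Dict Int Int)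
  array1.foldl
    (fun counter val => if values_1.contains val && values_2.contains val then counter + 1 else counter)
    0

-- ===== PORT B =====
-- the while loop of Source B: indices i, j over the two sorted lists, accumulator counter.
-- fuel is only a totality device; fuel = s1.length + s2.length always suffices.
def pvMergeLoop (s1 s2 : List Int) : Nat → Nat → Nat → Int → Int
  | 0, _, _, counter => counter
  | fuel + 1, i, j, counter =>
    if h : i < s1.length ∧ j < s2.length then
      if s1[i] < s2[j] then pvMergeLoop s1 s2 fuel (i + 1) j counter
      else if s1[i] > s2[j] then pvMergeLoop s1 s2 fuel i (j + 1) counter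
      else pvMergeLoop s1 s2 fuel (i + 1) j (counter + 1)
    else counter

def matching_elements_alt (array1 : List Int) (array2 : List Int) : Int :=
  let s1 := PySem.List.sorted array1 (fun x => x) false
  let s2 := PySem.List.sorted (PySem.Set.ofList array2) (fun x => x) false
  pvMergeLoop s1 s2 (s1.length + s2.length) 0 0 0

-- ===== PRECONDITION & SPEC =====
def Spec_matching_elements (array1 : List Int) (array2 : List Int) (out : Int) : Prop := out = matching_elements_alt array1 array2
instance (array1 : List Int) (array2 : List Int) (out : Int) : Decidable (Spec_matching_elements array1 array2 out) := by unfold Spec_matching_elements; infer_instance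

-- ===== CLAIM (what is proved, stated in full; the proofs are below) =====
def Claim_equal_matching_elements : Prop := ∀ (array1 : List Int) (array2 : List Int), Dom_matching_elements array1 array2 → Spec_matching_elements array1 array2 (matching_elements array1 array2)

-- ===== LEMMAS AND PROOFS =====

-- A's dict-building step always inserts count+1 (when the key is absent its current count is 0).
theorem pv_build_step (d : PySem.Dict Int Int) (v : Int) :
    (if d.contains v then d.insert v (d.getD v 0 + 1) else d.insert v 1)
      = d.insert v (d.getD v 0 + 1) := by
  by_cases h : d.contains v = true
  · simp [h]
  · have hget : d.get? v = none := by
      have := PySem.Dict.contains_eq_isSome_get? d v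
      rw [this] at h
      exact Option.not_isSome_iff_eq_none.mp (by simpa using h)
    simp [h, PySem.Dict.getD, hget]

-- A's dict-building loop is Counter.
theorem pv_build_eq_counter (xs : List Int) :
    xs.foldl (fun d val => if d.contains val then d.insert val (d.getD val 0 + 1) else d.insert val 1)
      (PySem.Dict.empty : PySem.Dict Int Int) = PySem.Dict.counter xs := by
  simp only [pv_build_step]
  exact PySem.Dict.foldl_insert_getD_add_one_eq_counter xs

-- A counts the elements of array1 that occur in array2.
theorem pv_A_eq_countP (array1 array2 : List Int) :
    matching_elements array1 array2 = (array1.countP (fun v => array2.contains v) : Int) := by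
  unfold matching_elements
  simp only [pv_build_eq_counter]
  rw [show (fun (counter : Int) (val : Int) =>
        if (PySem.Dict.counter array1).contains val && (PySem.Dict.counter array2).contains val
        then counter + 1 else counter)
      = fun counter val =>
        if array1.contains val && array2.contains val then counter + 1 else counter by
    funext c v; rw [PySem.Dict.contains_counter, PySem.Dict.contains_counter]]
  rw [PySem.List.foldl_count_if (fun val => array1.contains val && array2.contains val) array1 0]
  have hc : List.countP (fun val => array1.contains val && array2.contains val) array1
      = List.countP (fun v => array2.contains v) array1 := by
    apply List.countP_congr
    intro v hv
    simp only [Bool.and_eq_true, List.contains_eq_mem, decide_eq_true_eq]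
    exact ⟨fun h => h.2, fun h => ⟨by simpa using hv, h⟩⟩
  rw [hc]
  simp

-- The merge loop, on a (≤)-sorted s1 and strictly sorted s2, counts from position (i, j)
-- the elements of s1.drop i that occur in s2.drop j, added to the accumulator.
theorem pv_mergeLoop_eq (s1 s2 : List Int)
    (h1 : s1.Pairwise (· ≤ ·)) (h2 : s2.Pairwise (· < ·)) :
    ∀ fuel i j (counter : Int), (s1.length - i) + (s2.length - j) ≤ fuel →
      pvMergeLoop s1 s2 fuel i j counter
        = counter + ((s1.drop i).countP (fun v => (s2.drop j).contains v) : Int) := by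
  intro fuel
  induction fuel with
  | zero =>
    intro i j counter hf
    have : s1.drop i = [] ∨ s2.drop j = [] := by
      rcases Nat.le_zero.mp hf with h
      by_cases hi : s1.length ≤ i
      · exact Or.inl (List.drop_eq_nil_of_le hi)
      · exact Or.inr (List.drop_eq_nil_of_le (by omega))
    rcases this with h | h
    · simp [pvMergeLoop, h]
    · rw [pvMergeLoop, h]; simp
  | succ fuel ih =>
    intro i j counter hf
    rw [pvMergeLoop]
    by_cases h : i < s1.length ∧ j < s2.length
    · rw [dif_pos h]
      have hd1 : s1.drop i = s1[i] :: s1.drop (i + 1) := List.drop_eq_getElem_cons h.1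
      have hd2 : s2.drop j = s2[j] :: s2.drop (j + 1) := List.drop_eq_getElem_cons h.2
      by_cases hlt : s1[i] < s2[j]
      · rw [if_pos hlt, ih (i + 1) j counter (by omega)]
        -- s1[i] < s2[j] and s2.drop j is strictly increasing, so s1[i] ∉ s2.drop j
        have hnot : s1[i] ∉ s2.drop j := by
          intro hmem
          rw [hd2] at hmem
          rcases List.mem_cons.mp hmem with he | ht
          · omega
          · have hp2 : (s2.drop j).Pairwise (· < ·) := h2.drop
            rw [hd2] at hp2
            have := (List.pairwise_cons.mp hp2).1 _ ht
            omega
        rw [hd1, List.countP_cons]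
        simp [hnot]
      · rw [if_neg hlt]
        by_cases hgt : s1[i] > s2[j]
        · rw [if_pos hgt, ih i (j + 1) counter (by omega)]
          -- every element of s1.drop i is ≥ s1[i] > s2[j], so s2[j] never matches
          have hcong : (s1.drop i).countP (fun v => (s2.drop j).contains v)
              = (s1.drop i).countP (fun v => (s2.drop (j + 1)).contains v) := by
            apply List.countP_congr
            intro v hv
            have hge : s1[i] ≤ v := by
              rw [hd1] at hv
              rcases List.mem_cons.mp hv with he | ht
              · omega
              · have hp1 : (s1.drop i).Pairwise (· ≤ ·) := h1.drop
                rw [hd1] at hp1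
                exact (List.pairwise_cons.mp hp1).1 _ ht
            have hne : v ≠ s2[j] := by omega
            simp only [List.contains_eq_mem, decide_eq_true_eq, hd2, List.mem_cons]
            constructor
            · rintro (he | ht)
              · exact absurd he hne
              · exact ht
            · exact fun ht => Or.inr ht
          rw [hcong]
        · rw [if_neg hgt, ih (i + 1) j (counter + 1) (by omega)]
          have hmem : s1[i] ∈ s2.drop j := by
            rw [hd2, show s1[i] = s2[j] by omega]
            exact List.mem_cons_self
          rw [hd1, List.countP_cons]
          simp [hmem]
          ring
    · rw [dif_neg h]
      have : (s1.drop i).countP (fun v => (s2.drop j).contains v) = 0 := by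
        rcases not_and_or.mp h with hi | hj
        · have : s1.drop i = [] := List.drop_eq_nil_of_le (by omega)
          simp [this]
        · have : s2.drop j = [] := List.drop_eq_nil_of_le (by omega)
          rw [this]
          simp
      rw [this]
      simp

-- B counts the same thing.
theorem pv_B_eq_countP (array1 array2 : List Int) :
    matching_elements_alt array1 array2 = (array1.countP (fun v => array2.contains v) : Int) := by
  unfold matching_elements_alt
  have h1 : (PySem.List.sorted array1 (fun x => x) false).Pairwise (· ≤ ·) :=
    PySem.List.sorted_pairwise array1 (fun x => x)
  have h2 : (PySem.List.sorted (PySem.Set.ofList array2) (fun x => x) false).Pairwise (· < ·) :=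
    PySem.List.sorted_ofList_pairwise_lt array2
  rw [pv_mergeLoop_eq _ _ h1 h2 _ 0 0 0 (by omega)]
  simp only [List.drop_zero, zero_add]
  have hmem : ∀ v, (PySem.List.sorted (PySem.Set.ofList array2) (fun x => x) false).contains v
      = array2.contains v := by
    intro v
    simp only [List.contains_eq_mem]
    rw [decide_eq_decide]
    rw [PySem.List.mem_sorted, PySem.Set.mem_ofList]
  have hperm : (PySem.List.sorted array1 (fun x => x) false).Perm array1 :=
    PySem.List.sorted_perm array1 (fun x => x) false
  rw [show (fun v => (PySem.List.sorted (PySem.Set.ofList array2) (fun x => x) false).contains v)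
      = (fun v => array2.contains v) from funext hmem]
  rw [hperm.countP_eq]

-- ===== VERDICT (by name: the statement is the Claim_ definition above) =====
theorem matching_elements_spec : Claim_equal_matching_elements := by
  intro array1 array2 _
  unfold Spec_matching_elements
  rw [pv_A_eq_countP, pv_B_eq_countP]
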